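-- pv_equiv track=rewrite | github.com/AlexaGutieMora/P2P3_SE | JUEGO/Practica3Interfaz1.py | encadenamiento
-- ===== SOURCE A (Python) =====
-- def encadenamiento(datos, conocimiento):
--     posibles = []
--     for personaje, caracteristicas in conocimiento.items():
--         contradicho = False
--         for p_respondida, valor_respondido in datos.items():
--             if p_respondida in caracteristicas and caracteristicas[p_respondida] != valor_respondido:
--                 contradicho = True
--                 break
--         if not contradicho:
--             posibles.append(personaje)
--     return posibles
-- ===== SOURCE B (Python) =====
-- def encadenamiento(datos, conocimiento):
--     posibles = list(conocimiento.items())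
--     for q, v in datos.items():
--         posibles = [(p, c) for p, c in posibles if not (q in c and c[q] != v)]
--     return [p for p, _ in posibles]
-- ===== Notes on version B (the rewrite author's own statement) =====
-- stated objective: alternative
-- what changed: Flips the loop nesting: instead of scanning all answers per character, B seeds the full candidate list and performs one elimination (filter) pass over the candidates per answered question, projecting names at the end.
import Mathlib
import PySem

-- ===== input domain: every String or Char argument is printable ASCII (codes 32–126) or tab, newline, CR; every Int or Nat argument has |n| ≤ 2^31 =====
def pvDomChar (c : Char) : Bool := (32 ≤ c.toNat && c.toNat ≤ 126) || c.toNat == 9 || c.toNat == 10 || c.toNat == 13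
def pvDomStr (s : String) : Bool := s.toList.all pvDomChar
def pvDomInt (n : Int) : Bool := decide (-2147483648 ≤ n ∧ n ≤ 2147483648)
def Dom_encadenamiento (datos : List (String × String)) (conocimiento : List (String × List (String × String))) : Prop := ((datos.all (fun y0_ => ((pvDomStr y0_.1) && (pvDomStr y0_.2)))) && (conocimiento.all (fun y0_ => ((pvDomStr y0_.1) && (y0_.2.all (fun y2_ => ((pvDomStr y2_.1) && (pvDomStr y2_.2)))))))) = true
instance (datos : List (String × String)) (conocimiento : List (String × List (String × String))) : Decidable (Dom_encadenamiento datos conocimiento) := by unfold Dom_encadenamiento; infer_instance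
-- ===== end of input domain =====

-- B flips the loop nesting (one elimination filter pass over the candidate list per answered question
-- instead of a per-character scan of all answers); alternative decomposition, same cost.

-- ===== PORT A =====
-- inner loop of A: scan datos with early break on a contradiction
def pvContradicho (datos : List (String × String)) (car : List (String × String)) : Bool :=
  match datos with
  | [] => false
  | (q, v) :: rest =>
    match car.lookup q with          -- 'q in car and car[q] != v' (dict lookup = first match)
    | some x => if x ≠ v then true else pvContradicho rest car
    | none => pvContradicho rest car

def encadenamiento (datos : List (String × String)) (conocimiento : List (String × List (String × String))) : List String :=
  conocimiento.foldl
    (fun posibles pc => if !pvContradicho datos pc.2 then posibles ++ [pc.1] else posibles) []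

-- ===== PORT B =====
-- keep a candidate (name, caracteristicas) under one answered (q, v)
def pvKeep (q v : String) (pc : String × List (String × String)) : Bool :=
  match pc.2.lookup q with
  | some x => x == v
  | none => true

def encadenamiento_alt (datos : List (String × String)) (conocimiento : List (String × List (String × String))) : List String :=
  (datos.foldl (fun posibles qv => posibles.filter (pvKeep qv.1 qv.2)) conocimiento).map Prod.fst

-- ===== PRECONDITION & SPEC =====
def Spec_encadenamiento (datos : List (String × String)) (conocimiento : List (String × List (String × String))) (out : List String) : Prop := out = encadenamiento_alt datos conocimiento
instance (datos : List (String × String)) (conocimiento : List (String × List (String × String))) (out : List String) : Decidable (Spec_encadenamiento datos conocimiento out) := by unfold Spec_encadenamiento; infer_instance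

-- ===== CLAIM (what is proved, stated in full; the proofs are below) =====
def Claim_equal_encadenamiento : Prop := ∀ (datos : List (String × String)) (conocimiento : List (String × List (String × String))), Dom_encadenamiento datos conocimiento → Spec_encadenamiento datos conocimiento (encadenamiento datos conocimiento)

-- ===== LEMMAS AND PROOFS =====

-- A's break-scan says "no answer contradicts" iff every answer keeps the candidate
theorem pvContradicho_eq_all (datos car : List (String × String)) (p : String) :
    pvContradicho datos car = !datos.all (fun qv => pvKeep qv.1 qv.2 (p, car)) := by
  induction datos with
  | nil => simp [pvContradicho]
  | cons qv rest ih =>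
    obtain ⟨q, v⟩ := qv
    simp only [pvContradicho, List.all_cons, pvKeep]
    cases h : car.lookup q with
    | none => simpa using ih
    | some x =>
      by_cases hx : x = v <;> simp [hx, ih, pvKeep]

-- B's outer fold of filters is one filter by the conjunction of all answers
theorem foldl_filter_eq (datos : List (String × String))
    (l : List (String × List (String × String))) :
    datos.foldl (fun posibles qv => posibles.filter (pvKeep qv.1 qv.2)) l
      = l.filter (fun pc => datos.all (fun qv => pvKeep qv.1 qv.2 pc)) := by
  induction datos generalizing l with
  | nil => simp
  | cons qv rest ih =>
    simp only [List.foldl_cons, ih, List.filter_filter, List.all_cons]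
    apply List.filter_congr
    intro pc _
    simp [Bool.and_comm]

-- A's accumulator fold is append of a filter-then-project
theorem foldl_append_eq (datos : List (String × String))
    (l : List (String × List (String × String))) (acc : List String) :
    l.foldl (fun posibles pc => if !pvContradicho datos pc.2 then posibles ++ [pc.1] else posibles) acc
      = acc ++ (l.filter (fun pc => !pvContradicho datos pc.2)).map Prod.fst := by
  induction l generalizing acc with
  | nil => simp
  | cons pc rest ih =>
    rw [List.foldl_cons, List.filter_cons]
    cases h : (!pvContradicho datos pc.2) with
    | false => rw [if_neg (by simp [h]), ih, if_neg (by simp [h])]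
    | true =>
      rw [if_pos (by simp [h]), ih, if_pos (by simp [h])]
      simp

-- ===== VERDICT (by name: the statement is the Claim_ definition above) =====
theorem encadenamiento_spec : Claim_equal_encadenamiento := by
  intro datos conocimiento _
  unfold Spec_encadenamiento encadenamiento encadenamiento_alt
  rw [foldl_append_eq, foldl_filter_eq, List.nil_append]
  congr 1
  apply List.filter_congr
  intro pc _
  simp [pvContradicho_eq_all datos pc.2 pc.1]
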